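-- pv_equiv track=rewrite | github.com/shobonvip/shobon_code | waseda_eigo.py | waseda
-- ===== SOURCE A (Python) =====
-- def cton(c):
-- 	t=ord(c)
-- 	for u,v in ([96,c],[103,"1"],[109,"2"],[115,"3"],[122,"4"]):
-- 		if t<=u:return v
-- 	return c
--
-- def waseda(s):
-- 	m=1;r=[]
-- 	for i in s:
-- 		if i==" ":
-- 			r.append(i)
-- 			m=1
-- 		elif m==1:
-- 			r.append(i)
-- 			m=0
-- 		else:
-- 			r.append(cton(i))
-- 	return "".join(r)
-- ===== SOURCE B (Python) =====
-- _TBL = str.maketrans("abcdefghijklmnopqrstuvwxyz",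
--                      "1" * 7 + "2" * 6 + "3" * 6 + "4" * 7)
--
--
-- def waseda(s):
--     return ' '.join(w[:1] + w[1:].translate(_TBL) for w in s.split(' '))
-- ===== Notes on version B (the rewrite author's own statement) =====
-- stated objective: faster
-- what changed: A's stateful per-character loop with a mutable word-start flag and a threshold-chain cton is replaced by a split/join decomposition: split on a single space into word tokens, keep each token's first character and map the rest through a str.maketrans/str.translate table, then rejoin the tokens.
import Mathlib
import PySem

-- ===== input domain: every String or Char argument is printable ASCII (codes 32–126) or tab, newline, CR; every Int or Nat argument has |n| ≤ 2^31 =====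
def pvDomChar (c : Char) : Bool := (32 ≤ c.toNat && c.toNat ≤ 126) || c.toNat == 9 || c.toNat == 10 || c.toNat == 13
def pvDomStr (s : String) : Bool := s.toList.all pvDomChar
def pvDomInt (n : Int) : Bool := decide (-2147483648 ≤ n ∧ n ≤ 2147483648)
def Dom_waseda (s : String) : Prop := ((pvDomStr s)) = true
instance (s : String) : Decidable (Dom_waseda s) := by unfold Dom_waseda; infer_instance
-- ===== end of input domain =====

-- B replaces A's stateful flag loop with a split-on-space / per-word translate / rejoin decomposition (objective: faster; a timing run measured B faster).

-- ===== PORT A =====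
-- literal port of A's cton: loop over the (threshold, value) pairs
def ctonLoopA (t : Int) (dflt : Char) : List (Int × String) → String
  | [] => String.ofList [dflt]
  | (u, v) :: rest => if t ≤ u then v else ctonLoopA t dflt rest

def ctonA (c : Char) : String :=
  ctonLoopA (c.toNat : Int) c [(96, String.ofList [c]), (103, "1"), (109, "2"), (115, "3"), (122, "4")]

def wasedaStep (acc : Int × List String) (i : Char) : Int × List String :=
  if i = ' ' then (1, acc.2 ++ [String.ofList [i]])
  else if acc.1 = 1 then (0, acc.2 ++ [String.ofList [i]])
  else (acc.1, acc.2 ++ [ctonA i])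

def waseda (s : String) : String :=
  PySem.Str.join "" ((s.toList.foldl wasedaStep (1, [])).2)

-- ===== PORT B =====
-- Source B's _TBL = str.maketrans("abcdefghijklmnopqrstuvwxyz", "1"*7+"2"*6+"3"*6+"4"*7):
-- a dict from code point to replacement character
def pvTbl : PySem.Dict Int Char :=
  PySem.Dict.mk
    [(97,'1'),(98,'1'),(99,'1'),(100,'1'),(101,'1'),(102,'1'),(103,'1'),
     (104,'2'),(105,'2'),(106,'2'),(107,'2'),(108,'2'),(109,'2'),
     (110,'3'),(111,'3'),(112,'3'),(113,'3'),(114,'3'),(115,'3'),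
     (116,'4'),(117,'4'),(118,'4'),(119,'4'),(120,'4'),(121,'4'),(122,'4')]

-- str.translate applies the table per character, identity when the code point is absent
def trB (c : Char) : Char := pvTbl.getD (c.toNat : Int) c

-- ' '.join(w[:1] + w[1:].translate(_TBL) for w in s.split(' '))
def waseda_alt (s : String) : String :=
  PySem.Str.join " "
    ((s.toList.splitOn ' ').map (fun w => String.ofList (w.take 1 ++ (w.drop 1).map trB)))

-- ===== PRECONDITION & SPEC =====
def Spec_waseda (s : String) (out : String) : Prop := out = waseda_alt s
instance (s : String) (out : String) : Decidable (Spec_waseda s out) := by unfold Spec_waseda; infer_instance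

-- ===== CLAIM (what is proved, stated in full; the proofs are below) =====
def Claim_equal_waseda : Prop := ∀ (s : String), Dom_waseda s → Spec_waseda s (waseda s)

-- ===== LEMMAS AND PROOFS =====

-- direct-recursion reformulation of A's loop (proof helper)
def wasedaRec : Int → List Char → List String
  | _, [] => []
  | m, c :: cs =>
    if c = ' ' then String.ofList [c] :: wasedaRec 1 cs
    else if m = 1 then String.ofList [c] :: wasedaRec 0 cs
    else ctonA c :: wasedaRec m cs

theorem foldl_eq_rec (cs : List Char) : ∀ (r : List String) (m : Int),
    (cs.foldl wasedaStep (m, r)).2 = r ++ wasedaRec m cs := by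
  induction cs with
  | nil => intro r m; simp [wasedaRec]
  | cons c cs ih =>
    intro r m
    by_cases hc : c = ' '
    · simp [List.foldl_cons, wasedaStep, wasedaRec, hc, ih]
    · by_cases hm : m = 1
      · simp [List.foldl_cons, wasedaStep, wasedaRec, hc, hm, ih]
      · simp [List.foldl_cons, wasedaStep, wasedaRec, hc, hm, ih]

theorem join_nil_eq_flatten (ls : List (List Char)) :
    PySem.Chars.join [] ls = ls.flatten := by
  induction ls with
  | nil => simp [PySem.Chars.join_nil]
  | cons p rest ih =>
    cases rest with
    | nil => simp [PySem.Chars.join_singleton]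
    | cons q rest' => simp [PySem.Chars.join_cons_cons, ih]

theorem pvTbl_getD_val (n : Nat) (d : Char) (h1 : 97 ≤ n) (h2 : n ≤ 122) :
    pvTbl.getD (n : Int) d =
      (if n ≤ 103 then '1' else if n ≤ 109 then '2' else if n ≤ 115 then '3' else '4') := by
  interval_cases n <;> rfl

theorem trB_of_out (c : Char) (h : c.toNat < 97 ∨ 122 < c.toNat) : trB c = c := by
  apply PySem.Dict.getD_of_not_contains
  simp [pvTbl]
  omega

theorem ctonA_eq_trB (c : Char) : ctonA c = String.ofList [trB c] := by
  simp only [ctonA, ctonLoopA]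
  by_cases h0 : (c.toNat : Int) ≤ 96
  · rw [if_pos h0, trB_of_out c (by omega)]
  · rw [if_neg h0]
    have hval : ∀ (ha : 97 ≤ c.toNat) (hb : c.toNat ≤ 122), trB c =
        (if c.toNat ≤ 103 then '1' else if c.toNat ≤ 109 then '2'
          else if c.toNat ≤ 115 then '3' else '4') := fun ha hb => pvTbl_getD_val c.toNat c ha hb
    by_cases h1 : (c.toNat : Int) ≤ 103
    · rw [if_pos h1, hval (by omega) (by omega), if_pos (by omega)]
    · rw [if_neg h1]
      by_cases h2 : (c.toNat : Int) ≤ 109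
      · rw [if_pos h2, hval (by omega) (by omega), if_neg (by omega), if_pos (by omega)]
      · rw [if_neg h2]
        by_cases h3 : (c.toNat : Int) ≤ 115
        · rw [if_pos h3, hval (by omega) (by omega), if_neg (by omega), if_neg (by omega),
            if_pos (by omega)]
        · rw [if_neg h3]
          by_cases h4 : (c.toNat : Int) ≤ 122
          · rw [if_pos h4, hval (by omega) (by omega), if_neg (by omega), if_neg (by omega),
              if_neg (by omega)]
          · rw [if_neg h4, trB_of_out c (by omega)]

-- B's per-word transform, at the character level
def fB (w : List Char) : List Char := w.take 1 ++ (w.drop 1).map trB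

theorem splitOn_space_cons (c : Char) (cs : List Char) :
    (c :: cs).splitOn ' ' =
      (if c = ' ' then [] :: cs.splitOn ' '
       else (cs.splitOn ' ').modifyHead (c :: ·)) := by
  by_cases hc : c = ' ' <;> simp [List.splitOn, List.splitOnP_cons, hc]

-- the core invariant: A's recursion, flattened, equals B's word decomposition;
-- the second conjunct handles the mid-word state (m = 0): the whole head token is translated
theorem rec_eq_split (cs : List Char) : ∀ (t : List Char) (ts : List (List Char)),
    cs.splitOn ' ' = t :: ts →
    (List.map String.toList (wasedaRec 1 cs)).flatten
        = fB t ++ ts.flatMap (fun w => ' ' :: fB w)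
    ∧ (List.map String.toList (wasedaRec 0 cs)).flatten
        = t.map trB ++ ts.flatMap (fun w => ' ' :: fB w) := by
  induction cs with
  | nil =>
    intro t ts h
    simp only [List.splitOn_nil] at h
    cases h
    simp [wasedaRec, fB]
  | cons c cs ih =>
    intro t ts h
    obtain ⟨t', ts', hsplit⟩ : ∃ t' ts', cs.splitOn ' ' = t' :: ts' := by
      cases hcs : cs.splitOn ' ' with
      | nil => exact absurd (by simpa [List.splitOn] using hcs) (List.splitOnP_ne_nil _ _)
      | cons a b => exact ⟨a, b, rfl⟩
    obtain ⟨ih1, ih0⟩ := ih t' ts' hsplit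
    rw [splitOn_space_cons, hsplit] at h
    by_cases hc : c = ' '
    · rw [if_pos hc] at h
      cases h
      subst hc
      constructor <;>
        simp [wasedaRec, fB, ih1]
    · rw [if_neg hc, List.modifyHead_cons] at h
      cases h
      constructor <;>
        simp [wasedaRec, hc, fB, ih0, ctonA_eq_trB]

theorem intercalate_space (ts : List (List Char)) : ∀ (t : List Char),
    List.intercalate [' '] (t :: ts) = t ++ ts.flatMap (fun w => ' ' :: w) := by
  induction ts with
  | nil => intro t; simp [List.intercalate]
  | cons u us ih =>
    intro t
    simp only [List.intercalate, List.intersperse, List.flatten, List.flatMap_cons] at ih ⊢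
    simp [ih u]

-- ===== VERDICT (by name: the statement is the Claim_ definition above) =====
theorem waseda_spec : Claim_equal_waseda := by
  intro s _
  unfold Spec_waseda waseda waseda_alt
  apply String.toList_inj.mp
  rw [foldl_eq_rec s.toList [] 1, PySem.Str.toList_join, List.nil_append,
    show ("".toList : List Char) = [] from rfl, join_nil_eq_flatten,
    PySem.Str.toList_join, show (" ".toList : List Char) = [' '] from rfl]
  obtain ⟨t, ts, hsplit⟩ : ∃ t ts, s.toList.splitOn ' ' = t :: ts := by
    cases hcs : s.toList.splitOn ' ' with
    | nil => exact absurd (by simpa [List.splitOn] using hcs) (List.splitOnP_ne_nil _ _)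
    | cons a b => exact ⟨a, b, rfl⟩
  rw [(rec_eq_split s.toList t ts hsplit).1, hsplit]
  rw [show List.map String.toList
      (List.map (fun w => String.ofList (w.take 1 ++ (w.drop 1).map trB)) (t :: ts))
      = (t :: ts).map fB by simp [fB, Function.comp]]
  rw [show PySem.Chars.join [' '] ((t :: ts).map fB)
      = List.intercalate [' '] (fB t :: ts.map fB) from rfl,
    intercalate_space (ts.map fB) (fB t)]
  simp only [List.flatMap_def, List.map_map]
  rfl
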